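-- pv_equiv track=rewrite | github.com/bncolorado/adsoScansionSystem | analysis/modules/AnalizadorSinalefas/PorReglas/sinalefaReglas.py | incioConjuncionAtona
-- ===== SOURCE A (Python) =====
-- def incioConjuncionAtona(verso, sinlalefPorResolver):
--     indice = int()
--     salida = ''
--     for item in verso:
--         if item == ' ':
--             if verso[indice-1] in u'yaeiou' and indice-1 == 0 and verso[indice+1] in u'aeiouAEIOUÁÉÍÓÚhH':
--                 if sinlalefPorResolver > 0:
--                     salida += u'_'
--                     sinlalefPorResolver = sinlalefPorResolver-1
--                 else:
--                     salida += item
--             else: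
--                 salida += item
--         else:
--             salida += item
--         indice += 1
--     return salida, sinlalefPorResolver
-- ===== SOURCE B (Python) =====
-- def incioConjuncionAtona(verso, sinlalefPorResolver):
--     # Positional: A's loop can only act at index 1 (its branch needs indice-1 == 0).
--     if len(verso) > 1 and verso[1] == ' ' and verso[0] in u'yaeiou':
--         if verso[2] in u'aeiouAEIOUÁÉÍÓÚhH' and sinlalefPorResolver > 0:
--             return verso[0] + u'_' + verso[2:], sinlalefPorResolver - 1
--     return verso, sinlalefPorResolver
-- ===== Notes on version B (the rewrite author's own statement) =====
-- stated objective: simpler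
-- what changed: Replaces A's per-character scan-and-rebuild loop with O(1) positional checks at indices 0/1/2 and a single slice, since A's branch can only fire at index 1.
import Mathlib
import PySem

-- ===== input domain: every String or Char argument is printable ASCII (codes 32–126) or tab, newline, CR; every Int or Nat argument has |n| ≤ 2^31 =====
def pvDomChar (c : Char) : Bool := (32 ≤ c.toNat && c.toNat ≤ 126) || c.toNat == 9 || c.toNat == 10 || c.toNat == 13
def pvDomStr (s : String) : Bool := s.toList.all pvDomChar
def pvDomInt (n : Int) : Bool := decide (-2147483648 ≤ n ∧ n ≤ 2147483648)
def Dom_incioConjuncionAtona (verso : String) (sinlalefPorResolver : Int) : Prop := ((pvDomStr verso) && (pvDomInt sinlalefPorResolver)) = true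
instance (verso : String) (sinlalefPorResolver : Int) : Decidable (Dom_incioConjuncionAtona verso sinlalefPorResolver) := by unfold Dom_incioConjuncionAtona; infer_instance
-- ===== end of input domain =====

-- B replaces A's per-character scan with O(1) positional checks at indices 0/1/2 plus one slice (simpler).

-- the literal u'yaeiou'
def pvVow1 : List Char := ['y', 'a', 'e', 'i', 'o', 'u']
-- the literal u'aeiouAEIOUÁÉÍÓÚhH'
def pvVow2 : List Char := ['a', 'e', 'i', 'o', 'u', 'A', 'E', 'I', 'O', 'U', 'Á', 'É', 'Í', 'Ó', 'Ú', 'h', 'H']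

-- ===== PORT A =====
-- one iteration of A's for-loop; state = (salida, sinlalefPorResolver, indice).
-- verso[indice-1] / verso[indice+1] via pyGetD: under Pre_ the only lookup that could
-- raise in Python (verso[indice+1] on the length-2 case) is excluded, and the default
-- '?' is never consulted on inputs the claim covers.
def pvStepA (cs : List Char) : List Char × Int × Int → Char → List Char × Int × Int
  | (salida, sin, indice), item =>
    if item = ' ' then
      if PySem.List.pyGetD cs (indice - 1) '?' ∈ pvVow1 ∧ indice - 1 = 0 ∧
          PySem.List.pyGetD cs (indice + 1) '?' ∈ pvVow2 then
        if sin > 0 then (salida ++ ['_'], sin - 1, indice + 1)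
        else (salida ++ [item], sin, indice + 1)
      else (salida ++ [item], sin, indice + 1)
    else (salida ++ [item], sin, indice + 1)

def incioConjuncionAtona (verso : String) (sinlalefPorResolver : Int) : String × Int :=
  (String.ofList ((verso.toList.foldl (pvStepA verso.toList) ([], sinlalefPorResolver, 0)).1),
   (verso.toList.foldl (pvStepA verso.toList) ([], sinlalefPorResolver, 0)).2.1)

-- ===== PORT B =====
def incioConjuncionAtona_alt (verso : String) (sinlalefPorResolver : Int) : String × Int :=
  if 1 < verso.toList.length ∧ PySem.List.pyGetD verso.toList 1 '?' = ' ' ∧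
      PySem.List.pyGetD verso.toList 0 '?' ∈ pvVow1 then
    if PySem.List.pyGetD verso.toList 2 '?' ∈ pvVow2 ∧ sinlalefPorResolver > 0 then
      (String.ofList (PySem.List.pyGetD verso.toList 0 '?' :: '_' ::
        PySem.List.slice verso.toList (some 2) none), sinlalefPorResolver - 1)
    else (verso, sinlalefPorResolver)
  else (verso, sinlalefPorResolver)

-- ===== PRECONDITION & SPEC =====
-- Pre_ excludes exactly the inputs where Python A raises IndexError: a length-2 verso
-- whose first character is an unstressed vowel followed by a space (A reads verso[2]).
def Pre_incioConjuncionAtona (verso : String) (sinlalefPorResolver : Int) : Prop :=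
  ¬ (verso.toList.length = 2 ∧ PySem.List.pyGetD verso.toList 1 '?' = ' ' ∧
      PySem.List.pyGetD verso.toList 0 '?' ∈ pvVow1)
instance (verso : String) (sinlalefPorResolver : Int) : Decidable (Pre_incioConjuncionAtona verso sinlalefPorResolver) := by unfold Pre_incioConjuncionAtona; infer_instance

def pvWitness_incioConjuncionAtona : String × Int := ("e oh", 1)

def Spec_incioConjuncionAtona (verso : String) (sinlalefPorResolver : Int) (out : String × Int) : Prop := out = incioConjuncionAtona_alt verso sinlalefPorResolver
instance (verso : String) (sinlalefPorResolver : Int) (out : String × Int) : Decidable (Spec_incioConjuncionAtona verso sinlalefPorResolver out) := by unfold Spec_incioConjuncionAtona; infer_instance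

-- ===== CLAIM (what is proved, stated in full; the proofs are below) =====
def Claim_equal_incioConjuncionAtona : Prop := ∀ (verso : String) (sinlalefPorResolver : Int), Dom_incioConjuncionAtona verso sinlalefPorResolver → Pre_incioConjuncionAtona verso sinlalefPorResolver → Spec_incioConjuncionAtona verso sinlalefPorResolver (incioConjuncionAtona verso sinlalefPorResolver)

-- ===== LEMMAS AND PROOFS =====

-- away from index 1 the loop body just copies the character
theorem pvStepA_copy (cs : List Char) (item : Char) (salida : List Char) (sin indice : Int)
    (h : indice - 1 ≠ 0) :
    pvStepA cs (salida, sin, indice) item = (salida ++ [item], sin, indice + 1) := by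
  simp only [pvStepA]
  split_ifs with h1 h2 h3 <;> try rfl
  exact absurd h2.2.1 h

-- a non-space character is always copied, whatever the index
theorem pvStepA_copy_ne (cs : List Char) (item : Char) (salida : List Char) (sin indice : Int)
    (h : item ≠ ' ') :
    pvStepA cs (salida, sin, indice) item = (salida ++ [item], sin, indice + 1) := by
  simp only [pvStepA]
  rw [if_neg h]

theorem pvFoldA_copy (cs l : List Char) (salida : List Char) (sin indice : Int)
    (h : 2 ≤ indice) :
    l.foldl (pvStepA cs) (salida, sin, indice) = (salida ++ l, sin, indice + l.length) := by
  induction l generalizing salida indice with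
  | nil => simp
  | cons x xs ih =>
      rw [List.foldl_cons, pvStepA_copy cs x salida sin indice (by omega),
        ih (salida ++ [x]) (indice + 1) (by omega)]
      simp
      omega

theorem pvGetD0 (a : Char) (l : List Char) : PySem.List.pyGetD (a :: l) 0 '?' = a := by
  simp [PySem.List.pyGetD, PySem.List.pyGet?, PySem.List.pyIdx?]

theorem pvGetD1 (a b : Char) (l : List Char) : PySem.List.pyGetD (a :: b :: l) 1 '?' = b := by
  simp [PySem.List.pyGetD, PySem.List.pyGet?, PySem.List.pyIdx?]

theorem pvGetD2 (a b c : Char) (l : List Char) :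
    PySem.List.pyGetD (a :: b :: c :: l) 2 '?' = c := by
  simp [PySem.List.pyGetD, PySem.List.pyGet?, PySem.List.pyIdx?]
  rw [if_pos (by omega)]
  simp

theorem pvSlice2 (a b : Char) (l : List Char) :
    PySem.List.slice (a :: b :: l) (some 2) none = l := by
  simp [PySem.List.slice]

theorem incioConjuncionAtona_main (verso : String) (sinlalefPorResolver : Int)
    (hpre : Pre_incioConjuncionAtona verso sinlalefPorResolver) :
    incioConjuncionAtona verso sinlalefPorResolver
      = incioConjuncionAtona_alt verso sinlalefPorResolver := by
  unfold Pre_incioConjuncionAtona at hpre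
  have hmk : String.ofList verso.toList = verso := String.ofList_toList
  simp only [incioConjuncionAtona, incioConjuncionAtona_alt]
  cases hcs : verso.toList with
  | nil =>
      have hv : verso = String.ofList [] := by rw [← hmk, hcs]
      simp [hv]
  | cons a tl =>
    cases tl with
    | nil =>
        have hv : verso = String.ofList [a] := by rw [← hmk, hcs]
        rw [List.foldl_cons, pvStepA_copy _ a [] _ 0 (by omega)]
        simp [hv]
    | cons b rest =>
        have hv : verso = String.ofList (a :: b :: rest) := by rw [← hmk, hcs]
        rw [hcs] at hpre
        rw [List.foldl_cons, pvStepA_copy _ a [] _ 0 (by omega), List.foldl_cons]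
        simp only [List.nil_append, zero_add, pvGetD0, pvGetD1]
        by_cases hb : b = ' '
        · by_cases ha : a ∈ pvVow1
          · -- the trigger position: rest must be nonempty by Pre_
            cases rest with
            | nil => exact absurd ⟨by simp, by simpa [pvGetD1] using hb, by
                simpa [pvGetD0] using ha⟩ hpre
            | cons c rest' =>
              simp only [pvGetD2, pvSlice2]
              by_cases hc : c ∈ pvVow2
              · by_cases hs : sinlalefPorResolver > 0
                · simp only [pvStepA]
                  rw [if_pos hb, if_pos ⟨by simpa [pvGetD0] using ha, by norm_num, by
                    simpa [pvGetD2] using hc⟩, if_pos hs]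
                  rw [pvFoldA_copy _ _ _ _ (1 + 1) (by omega)]
                  rw [if_pos ⟨by simp, hb, ha⟩, if_pos ⟨hc, hs⟩]
                  simp
                · simp only [pvStepA]
                  rw [if_pos hb, if_pos ⟨by simpa [pvGetD0] using ha, by norm_num, by
                    simpa [pvGetD2] using hc⟩, if_neg hs]
                  rw [pvFoldA_copy _ _ _ _ (1 + 1) (by omega)]
                  rw [if_pos ⟨by simp, hb, ha⟩, if_neg (fun hcon => hs hcon.2)]
                  simp [hb, hv]
              · simp only [pvStepA]
                rw [if_pos hb,
                  if_neg (fun hcon => hc (by simpa [pvGetD2] using hcon.2.2))]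
                rw [pvFoldA_copy _ _ _ _ (1 + 1) (by omega)]
                rw [if_pos ⟨by simp, hb, ha⟩, if_neg (fun hcon => hc hcon.1)]
                simp [hb, hv]
          · simp only [pvStepA]
            rw [if_pos hb,
              if_neg (fun hcon => ha (by simpa [pvGetD0] using hcon.1))]
            rw [pvFoldA_copy _ _ _ _ (1 + 1) (by omega)]
            rw [if_neg (fun hcon => ha hcon.2.2)]
            simp [hb, hv]
        · rw [pvStepA_copy_ne _ b [a] _ 1 hb]
          rw [pvFoldA_copy _ _ _ _ (1 + 1) (by omega)]
          rw [if_neg (fun hcon => hb hcon.2.1)]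
          simp [hv]

-- ===== VERDICT (by name: the statement is the Claim_ definition above) =====
theorem incioConjuncionAtona_spec : Claim_equal_incioConjuncionAtona := by
  intro verso s _ hpre
  exact incioConjuncionAtona_main verso s hpre
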